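-- pv_equiv track=rewrite | github.com/markram4/AIO_paper | random_forest_classifications/gen_features.py | Counting_tetra
-- ===== SOURCE A (Python) =====
-- from itertools import product
--
-- def Counting_tetra(seq):
--     sequence = seq
--     tetra_nucleotides = [''.join(x) for x in product('ACGT', repeat=4)] # Generate all possible terai-nucleotides
--     tetra_count = {tetra: 0 for tetra in tetra_nucleotides} # Initialize dictionary with all tri-nucleotides
--
--     for i in range(len(sequence) - 3):
--         tetra = sequence[i:i+4].upper() # Extract current tri-nucleotide
--         if tetra in tetra_count :
--             tetra_count[tetra] += 1 # Increment count if tri-nucleotide is valid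
--
--
--     return tetra_count
-- ===== SOURCE B (Python) =====
-- def Counting_tetra(seq):
--     # Rolling base-4 code over the characters: each valid char shifts a 4-digit code;
--     # counts live in a 256-slot array; key strings are decoded from the index at the end.
--     DIG = {'A': 0, 'C': 1, 'G': 2, 'T': 3, 'a': 0, 'c': 1, 'g': 2, 't': 3}
--     counts = [0] * 256
--     code = 0
--     run = 0
--     for ch in seq:
--         d = DIG.get(ch)
--         if d is None:
--             code = 0
--             run = 0
--         else:
--             code = (code * 4 + d) % 256
--             run += 1
--             if run >= 4:
--                 counts[code] += 1
--     B = 'ACGT'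
--     return {B[c // 64 % 4] + B[c // 16 % 4] + B[c // 4 % 4] + B[c % 4]: counts[c]
--             for c in range(256)}
-- ===== Notes on version B (the rewrite author's own statement) =====
-- stated objective: alternative
-- what changed: B replaces A's slice-window-and-dict-increment loop by a rolling base-4 hash: one pass over the characters maintains a running 4-digit code (mod 256) and a valid-run length, counts land in a 256-slot integer array, and the key strings are decoded from the array index only at the end.
import Mathlib
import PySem

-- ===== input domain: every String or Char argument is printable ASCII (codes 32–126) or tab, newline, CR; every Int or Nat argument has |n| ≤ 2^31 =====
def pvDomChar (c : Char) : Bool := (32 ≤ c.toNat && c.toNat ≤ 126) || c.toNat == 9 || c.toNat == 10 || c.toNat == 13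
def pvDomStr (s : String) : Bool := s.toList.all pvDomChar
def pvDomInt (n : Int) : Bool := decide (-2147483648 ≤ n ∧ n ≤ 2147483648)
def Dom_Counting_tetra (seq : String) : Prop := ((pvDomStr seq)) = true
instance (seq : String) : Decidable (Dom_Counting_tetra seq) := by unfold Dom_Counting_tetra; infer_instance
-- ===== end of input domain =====

-- B replaces A's slice-window/dict-increment loop by a rolling base-4 code (mod 256) with a
-- valid-run counter, tallying into a 256-slot array whose indices are decoded to keys at the end
-- (objective: alternative algorithm, same asymptotic cost).

-- ===== PORT A =====
-- A: seq[i:i+4].upper()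
def pvWin (seq : String) (i : Int) : String :=
  PySem.Str.upper (PySem.Str.slice seq (some i) (some (i + 4)))

-- A: [''.join(x) for x in product('ACGT', repeat=4)]
def pvTetras : List String :=
  ("ACGT".toList).flatMap (fun a => ("ACGT".toList).flatMap (fun b =>
    ("ACGT".toList).flatMap (fun c => ("ACGT".toList).map (fun d =>
      String.ofList [a, b, c, d]))))

def Counting_tetra (seq : String) : List (String × Int) :=
  let tetra_count : PySem.Dict String Int :=
    pvTetras.foldl (fun d t => d.insert t 0) PySem.Dict.empty
  ((PySem.List.pyRange 0 (PySem.Str.len seq - 3) 1).foldl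
      (fun d i =>
        let tetra := pvWin seq i
        if d.contains tetra then d.modify tetra 0 (· + 1) else d)
      tetra_count).items

-- ===== PORT B =====
-- B: DIG = {'A':0,...,'t':3}
def pvDIG : PySem.Dict Char Int :=
  PySem.Dict.mk [('A',0),('C',1),('G',2),('T',3),('a',0),('c',1),('g',2),('t',3)]

-- B: one iteration of the for-loop; state = (counts, code, run)
def pvStepB (st : List Int × Int × Int) (ch : Char) : List Int × Int × Int :=
  match pvDIG.get? ch with
  | none => (st.1, 0, 0)
  | some d =>
      let code := PySem.Int.mod (st.2.1 * 4 + d) 256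
      let run := st.2.2 + 1
      if 4 ≤ run then
        (PySem.List.pySetD st.1 code (PySem.List.pyGetD st.1 code 0 + 1), code, run)
      else (st.1, code, run)

-- B: B[c // 64 % 4] + B[c // 16 % 4] + B[c // 4 % 4] + B[c % 4]
-- (string indexing ported by pyGetD: the index is always in 0..3, so the default is never used)
def pvDecode (c : Int) : String :=
  String.ofList
    [PySem.List.pyGetD "ACGT".toList (PySem.Int.mod (PySem.Int.floordiv c 64) 4) 'A',
     PySem.List.pyGetD "ACGT".toList (PySem.Int.mod (PySem.Int.floordiv c 16) 4) 'A',
     PySem.List.pyGetD "ACGT".toList (PySem.Int.mod (PySem.Int.floordiv c 4) 4) 'A',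
     PySem.List.pyGetD "ACGT".toList (PySem.Int.mod c 4) 'A']

def Counting_tetra_alt (seq : String) : List (String × Int) :=
  let counts0 : List Int := PySem.List.pyRepeat [(0 : Int)] 256
  let st := seq.toList.foldl pvStepB (counts0, 0, 0)
  ((PySem.List.pyRange 0 256 1).foldl
      (fun d c => d.insert (pvDecode c) (PySem.List.pyGetD st.1 c 0))
      PySem.Dict.empty).items

-- ===== PRECONDITION & SPEC =====
def Spec_Counting_tetra (seq : String) (out : List (String × Int)) : Prop := out = Counting_tetra_alt seq
instance (seq : String) (out : List (String × Int)) : Decidable (Spec_Counting_tetra seq out) := by unfold Spec_Counting_tetra; infer_instance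

-- ===== CLAIM (what is proved, stated in full; the proofs are below) =====
def Claim_equal_Counting_tetra : Prop := ∀ (seq : String), Dom_Counting_tetra seq → Spec_Counting_tetra seq (Counting_tetra seq)

-- ===== LEMMAS AND PROOFS =====

-- ---------- proof-side vocabulary ----------
def pvOk (c : Char) : Bool := (pvDIG.get? c).isSome
def pvD0 (c : Char) : Int := (pvDIG.get? c).getD 0
def pvB4 (w : List Char) : Int := w.foldl (fun a c => a * 4 + pvD0 c) 0
def pvEnc (w : List Char) : Option Int := if w.all pvOk then some (pvB4 w) else none
def pvVS (l : List Char) : List Char := (l.reverse.takeWhile pvOk).reverse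
def pvCnt (l : List Char) (e : Nat) : Int :=
  ((List.range (l.length - 3)).countP (fun i => pvEnc ((l.drop i).take 4) == some (e : Int)) : Int)
def pvCounts (l : List Char) : List Int := (List.range 256).map (pvCnt l)

-- ---------- character-level facts ----------
lemma pvDig_eq (c : Char) : pvDIG.get? c =
    if c = 'A' ∨ c = 'a' then some 0 else if c = 'C' ∨ c = 'c' then some 1
    else if c = 'G' ∨ c = 'g' then some 2 else if c = 'T' ∨ c = 't' then some 3 else none := by
  by_cases hA : c = 'A'; · subst hA; decide
  by_cases hC : c = 'C'; · subst hC; decide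
  by_cases hG : c = 'G'; · subst hG; decide
  by_cases hT : c = 'T'; · subst hT; decide
  by_cases ha : c = 'a'; · subst ha; decide
  by_cases hc : c = 'c'; · subst hc; decide
  by_cases hg : c = 'g'; · subst hg; decide
  by_cases ht : c = 't'; · subst ht; decide
  rw [show pvDIG.get? c = none from ?_]
  · simp [hA, hC, hG, hT, ha, hc, hg, ht]
  · simp only [pvDIG, PySem.Dict.get?, Option.map_eq_none_iff, List.find?_eq_none]
    intro p hp
    simp only [List.mem_cons, List.not_mem_nil, or_false] at hp
    rcases hp with h|h|h|h|h|h|h|h <;> subst h <;> simp <;>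
      first
        | exact fun h => hA h.symm
        | exact fun h => hC h.symm
        | exact fun h => hG h.symm
        | exact fun h => hT h.symm
        | exact fun h => ha h.symm
        | exact fun h => hc h.symm
        | exact fun h => hg h.symm
        | exact fun h => ht h.symm

lemma pvUpperChar_eq_iff (c t u : Char) (h1 : t.toNat + 32 = u.toNat)
    (h2 : 65 ≤ t.toNat) (h3 : t.toNat ≤ 90) :
    PySem.Chars.upperChar c = t ↔ (c = t ∨ c = u) := by
  have hval : ∀ n : Nat, n < 128 → n.isValidChar := fun n h => Or.inl (by omega)
  have hle : ∀ a b : Char, (a ≤ b) ↔ a.toNat ≤ b.toNat := fun a b => by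
    rw [Char.le_def, UInt32.le_iff_toNat_le]; rfl
  unfold PySem.Chars.upperChar PySem.Chars.islower
  by_cases hlo : ('a' ≤ c ∧ c ≤ 'z')
  · have h97 : 97 ≤ c.toNat := by have := (hle 'a' c).mp hlo.1; simpa using this
    have h122 : c.toNat ≤ 122 := by have := (hle c 'z').mp hlo.2; simpa using this
    rw [if_pos (by simp [hlo.1, hlo.2])]
    constructor
    · intro he
      right
      have := congrArg Char.toNat he
      rw [Char.toNat_ofNat, if_pos (hval _ (by omega))] at this
      have hc : c.toNat = u.toNat := by omega
      calc c = Char.ofNat c.toNat := (Char.ofNat_toNat c).symm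
        _ = Char.ofNat u.toNat := by rw [hc]
        _ = u := Char.ofNat_toNat u
    · rintro (rfl | rfl)
      · omega
      · have : Char.ofNat (c.toNat - 32) = Char.ofNat t.toNat := by congr 1; omega
        rw [this, Char.ofNat_toNat]
  · have hif : ¬ ((decide ('a' ≤ c) && decide (c ≤ 'z')) = true) := by
      simp only [Bool.and_eq_true, decide_eq_true_eq]; exact hlo
    rw [if_neg hif]
    constructor
    · exact fun h => Or.inl h
    · rintro (rfl | rfl)
      · rfl
      · exfalso
        exact hlo ⟨(hle _ _).mpr (by simpa using by omega), (hle _ _).mpr (by simpa using by omega)⟩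

lemma pvD0_bounds (c : Char) : 0 ≤ pvD0 c ∧ pvD0 c < 4 := by
  unfold pvD0
  rw [pvDig_eq]
  split_ifs <;> norm_num

lemma pvGet_iff_ok (c : Char) (x : Int) :
    pvDIG.get? c = some x ↔ (pvOk c = true ∧ pvD0 c = x) := by
  unfold pvOk pvD0
  cases h : pvDIG.get? c <;> simp [h, eq_comm]

lemma pvCharBridge (c : Char) (i : Nat) (hi : i < 4) :
    (PySem.Chars.upperChar c = "ACGT".toList.getD i 'A') ↔ pvDIG.get? c = some (i : Int) := by
  interval_cases i <;>
    rw [pvDig_eq] <;>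
    [ rw [show ("ACGT".toList.getD 0 'A') = 'A' from rfl,
        pvUpperChar_eq_iff c 'A' 'a' (by decide) (by decide) (by decide)];
      rw [show ("ACGT".toList.getD 1 'A') = 'C' from rfl,
        pvUpperChar_eq_iff c 'C' 'c' (by decide) (by decide) (by decide)];
      rw [show ("ACGT".toList.getD 2 'A') = 'G' from rfl,
        pvUpperChar_eq_iff c 'G' 'g' (by decide) (by decide) (by decide)];
      rw [show ("ACGT".toList.getD 3 'A') = 'T' from rfl,
        pvUpperChar_eq_iff c 'T' 't' (by decide) (by decide) (by decide)] ] <;>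
    (split_ifs with h1 h2 h3 h4 <;> simp_all <;>
      first
        | (rintro (rfl | rfl) <;> simp_all)
        | (rcases h1 with rfl | rfl <;> simp_all)
        | (rcases h2 with rfl | rfl <;> simp_all)
        | (rcases h3 with rfl | rfl <;> simp_all)
        | (rcases h4 with rfl | rfl <;> simp_all))

-- ---------- base-4 value ----------
lemma pvB4_aux (w : List Char) : ∀ a : Int,
    w.foldl (fun a c => a * 4 + pvD0 c) a = a * 4 ^ w.length + pvB4 w := by
  induction w with
  | nil => intro a; simp [pvB4]
  | cons c w ih =>
    intro a
    have hc : pvB4 (c :: w) = pvD0 c * 4 ^ w.length + pvB4 w := by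
      have h0 : pvB4 (c :: w)
          = w.foldl (fun a c => a * 4 + pvD0 c) ((0 : Int) * 4 + pvD0 c) := rfl
      rw [h0, ih]
      ring
    simp only [List.foldl_cons, List.length_cons]
    rw [ih, hc]
    ring

lemma pvB4_append (u v : List Char) :
    pvB4 (u ++ v) = pvB4 u * 4 ^ v.length + pvB4 v := by
  unfold pvB4
  rw [List.foldl_append]
  exact pvB4_aux v _

lemma pvB4_singleton (c : Char) : pvB4 [c] = pvD0 c := by
  simp [pvB4]

lemma pvB4_bounds (w : List Char) : 0 ≤ pvB4 w ∧ pvB4 w < 4 ^ w.length := by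
  induction w with
  | nil => simp [pvB4]
  | cons c w ih =>
    have hc := pvD0_bounds c
    have h : pvB4 (c :: w) = pvD0 c * 4 ^ w.length + pvB4 w := by
      have := pvB4_append [c] w
      simpa [pvB4_singleton] using this
    have hp : (0:Int) < 4 ^ w.length := by positivity
    constructor
    · rw [h]; nlinarith [ih.1, hc.1]
    · rw [h, List.length_cons, pow_succ]
      nlinarith [ih.2, hc.2, ih.1, hc.1]

-- base-4 value of a valid list, mod 256, is the value of its last four digits
lemma pvB4_mod_drop (s : List Char) (h4 : 4 ≤ s.length) :
    pvB4 s % 256 = pvB4 (s.drop (s.length - 4)) := by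
  have hsplit : s = s.take (s.length - 4) ++ s.drop (s.length - 4) := (List.take_append_drop _ _).symm
  have hlen : (s.drop (s.length - 4)).length = 4 := by
    rw [List.length_drop]; omega
  have hb := pvB4_bounds (s.drop (s.length - 4))
  rw [hlen] at hb
  conv_lhs => rw [hsplit]
  rw [pvB4_append, hlen]
  have : (4:Int) ^ 4 = 256 := by norm_num
  rw [this]
  omega

-- ---------- maximal valid suffix ----------
lemma pvVS_append_ok (l : List Char) (c : Char) (h : pvOk c = true) :
    pvVS (l ++ [c]) = pvVS l ++ [c] := by
  unfold pvVS
  rw [List.reverse_append, List.reverse_singleton, List.singleton_append,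
    List.takeWhile_cons, if_pos h, List.reverse_cons]

lemma pvVS_append_bad (l : List Char) (c : Char) (h : pvOk c = false) :
    pvVS (l ++ [c]) = [] := by
  unfold pvVS
  rw [List.reverse_append, List.reverse_singleton, List.singleton_append,
    List.takeWhile_cons, if_neg (by simp [h]), List.reverse_nil]

lemma pvVS_suffix (l : List Char) : pvVS l <:+ l := by
  unfold pvVS
  have h : (l.reverse.takeWhile pvOk) <+: l.reverse := List.takeWhile_prefix pvOk
  have h2 := (List.reverse_suffix (l₁ := l.reverse.takeWhile pvOk) (l₂ := l.reverse)).mpr h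
  simpa using h2

lemma pvVS_all (l : List Char) : ∀ c ∈ pvVS l, pvOk c = true := by
  intro c hc
  unfold pvVS at hc
  rw [List.mem_reverse] at hc
  exact List.mem_takeWhile_imp hc

-- if the last k characters of l are all valid, the valid suffix has length ≥ k
lemma pvTakeWhile_len {α : Type} (p : α → Bool) :
    ∀ (t : List α) (k : Nat), k ≤ t.length → ((t.take k).all p = true) →
      k ≤ (t.takeWhile p).length := by
  intro t
  induction t with
  | nil => intro k hk _; simpa using hk
  | cons x t ih =>
    intro k hk hall
    cases k with
    | zero => omega
    | succ k =>
      simp only [List.take_succ_cons, List.all_cons, Bool.and_eq_true] at hall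
      rw [List.takeWhile_cons, if_pos hall.1]
      simp only [List.length_cons]
      have := ih k (by simpa using hk) hall.2
      omega

lemma pvVS_max (l : List Char) (k : Nat) (hk : k ≤ l.length)
    (h : ((l.drop (l.length - k)).all pvOk) = true) : k ≤ (pvVS l).length := by
  unfold pvVS
  rw [List.length_reverse]
  apply pvTakeWhile_len pvOk l.reverse k (by simpa using hk)
  have hrw : (l.drop (l.length - k)).reverse = l.reverse.take k := by
    rw [List.reverse_drop]
    congr 1
    omega
  rw [← hrw]
  simpa using h

-- ---------- counting windows ----------
lemma pvWindow_stable (l : List Char) (c : Char) (i : Nat) (h : i + 4 ≤ l.length) :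
    ((l ++ [c]).drop i).take 4 = (l.drop i).take 4 := by
  rw [List.drop_append_of_le_length (by omega),
    List.take_append_of_le_length (by rw [List.length_drop]; omega)]

lemma pvWindow_last (l : List Char) (c : Char) (h : 3 ≤ l.length) :
    ((l ++ [c]).drop (l.length - 3)).take 4 = l.drop (l.length - 3) ++ [c] := by
  rw [List.drop_append_of_le_length (by omega)]
  apply List.take_of_length_le
  simp only [List.length_append, List.length_drop, List.length_cons, List.length_nil]
  omega

lemma pvCnt_append (l : List Char) (c : Char) (e : Nat) :
    pvCnt (l ++ [c]) e = pvCnt l e +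
      (if 3 ≤ l.length ∧ pvEnc (l.drop (l.length - 3) ++ [c]) = some (e : Int)
        then 1 else 0) := by
  unfold pvCnt
  by_cases h3 : 3 ≤ l.length
  · have hlen : (l ++ [c]).length - 3 = (l.length - 3) + 1 := by
      simp only [List.length_append, List.length_cons, List.length_nil]; omega
    rw [hlen, List.range_succ, List.countP_append]
    have hcommon : (List.range (l.length - 3)).countP
          (fun i => pvEnc (((l ++ [c]).drop i).take 4) == some (e : Int))
        = (List.range (l.length - 3)).countP
          (fun i => pvEnc ((l.drop i).take 4) == some (e : Int)) := by
      apply List.countP_congr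
      intro i hi
      rw [List.mem_range] at hi
      rw [pvWindow_stable l c i (by omega)]
    rw [hcommon]
    simp only [List.countP_cons, List.countP_nil, Nat.zero_add]
    rw [pvWindow_last l c h3]
    push_cast
    by_cases he : pvEnc (l.drop (l.length - 3) ++ [c]) = some (e : Int) <;>
      simp [he, h3]
  · rw [show (l ++ [c]).length - 3 = 0 from by
        simp only [List.length_append, List.length_cons, List.length_nil]; omega,
      show l.length - 3 = 0 from by omega]
    simp [h3]

-- ---------- the rolling-code invariant ----------
set_option maxRecDepth 10000 in
lemma pvCounts_nil : PySem.List.pyRepeat [(0 : Int)] 256 = pvCounts [] := by decide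

set_option maxRecDepth 10000 in
lemma pvInv (l : List Char) :
    l.foldl pvStepB (PySem.List.pyRepeat [(0 : Int)] 256, 0, 0)
      = (pvCounts l, PySem.Int.mod (pvB4 (pvVS l)) 256, ((pvVS l).length : Int)) := by
  induction l using List.reverseRecOn with
  | nil =>
    rw [List.foldl_nil, pvCounts_nil]
    refine congrArg (Prod.mk _) ?_
    decide
  | append_singleton l c ih =>
    rw [List.foldl_append, List.foldl_cons, List.foldl_nil, ih]
    cases hdig : pvDIG.get? c with
    | none =>
      have hok : pvOk c = false := by simp [pvOk, hdig]
      have hcounts : pvCounts (l ++ [c]) = pvCounts l := by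
        unfold pvCounts
        apply List.map_congr_left
        intro e _
        rw [pvCnt_append]
        have : pvEnc (l.drop (l.length - 3) ++ [c]) = none := by
          unfold pvEnc
          rw [if_neg]
          simp [List.all_append, hok]
        simp [this]
      simp only [pvStepB, hdig]
      rw [pvVS_append_bad l c hok, hcounts]
      have hz : PySem.Int.mod (pvB4 []) 256 = 0 := by decide
      simp [hz, pvB4]
    | some d =>
      have hok : pvOk c = true := by simp [pvOk, hdig]
      have hd0 : pvD0 c = d := by simp [pvD0, hdig]
      simp only [pvStepB, hdig]
      rw [pvVS_append_ok l c hok]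
      have hmod : PySem.Int.mod (PySem.Int.mod (pvB4 (pvVS l)) 256 * 4 + d) 256
          = PySem.Int.mod (pvB4 (pvVS l ++ [c])) 256 := by
        rw [PySem.Int.mod_eq_emod_of_pos (by norm_num),
          PySem.Int.mod_eq_emod_of_pos (by norm_num),
          PySem.Int.mod_eq_emod_of_pos (by norm_num),
          pvB4_append, pvB4_singleton, hd0]
        simp only [List.length_cons, List.length_nil, zero_add, pow_one]
        omega
      have hrunlen : ((pvVS l ++ [c]).length : Int) = ((pvVS l).length : Int) + 1 := by
        simp [List.length_append]
      set r := (pvVS l).length with hr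
      by_cases hrun : (4 : Int) ≤ (r : Int) + 1
      · rw [if_pos hrun]
        have hr3 : 3 ≤ r := by omega
        obtain ⟨u, hu⟩ := pvVS_suffix l
        have hul : u.length + r = l.length := by
          rw [hr]
          conv_rhs => rw [← hu]
          rw [List.length_append]
        have hl3 : 3 ≤ l.length := by omega
        set W : List Char := l.drop (l.length - 3) ++ [c] with hW
        have hWdrop : l.drop (l.length - 3) = (pvVS l).drop (r - 3) := by
          conv_lhs => rw [← hu]
          rw [List.drop_append]
          have hlen2 : (u ++ pvVS l).length = u.length + r := by
            simp only [List.length_append, ← hr]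
          rw [hlen2, List.drop_of_length_le (by omega), List.nil_append]
          congr 1
          omega
        have hWlen : W.length = 4 := by
          rw [hW]
          simp only [List.length_append, List.length_drop, List.length_cons, List.length_nil]
          omega
        have hWok : W.all pvOk = true := by
          have h2 : ∀ x ∈ l.drop (l.length - 3), pvOk x = true := by
            intro x hx
            exact pvVS_all l x (List.mem_of_mem_drop (hWdrop ▸ hx))
          rw [hW, List.all_append]
          simp only [List.all_eq_true, Bool.and_eq_true]
          exact ⟨h2, by simp [hok]⟩
        have hWenc : pvEnc W = some (pvB4 W) := by
          unfold pvEnc; rw [if_pos hWok]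
        have hdropVS : (pvVS l ++ [c]).drop ((pvVS l ++ [c]).length - 4) = W := by
          have hlen3 : (pvVS l ++ [c]).length - 4 = r - 3 := by
            simp only [List.length_append, List.length_cons, List.length_nil]
            omega
          rw [hlen3, List.drop_append_of_le_length (by omega), hW, hWdrop]
        have hcode : PySem.Int.mod (pvB4 (pvVS l ++ [c])) 256 = pvB4 W := by
          rw [PySem.Int.mod_eq_emod_of_pos (by norm_num),
            pvB4_mod_drop _ (by
              simp only [List.length_append, List.length_cons, List.length_nil]
              omega),
            hdropVS]
        have hWb := pvB4_bounds W
        rw [hWlen] at hWb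
        have hWb' : pvB4 W < 256 := by norm_num at hWb; exact hWb.2
        have hclen : (pvCounts l).length = 256 := by simp [pvCounts]
        have hcounts : PySem.List.pySetD (pvCounts l)
              (PySem.Int.mod (PySem.Int.mod (pvB4 (pvVS l)) 256 * 4 + d) 256)
              (PySem.List.pyGetD (pvCounts l)
                (PySem.Int.mod (PySem.Int.mod (pvB4 (pvVS l)) 256 * 4 + d) 256) 0 + 1)
            = pvCounts (l ++ [c]) := by
          rw [hmod, hcode]
          rw [PySem.List.pySetD_of_nonneg _ _ hWb.1,
            PySem.List.pyGetD_eq_getElem _ _ hWb.1 (by rw [hclen]; exact_mod_cast hWb')]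
          apply List.ext_getElem
          · simp [pvCounts]
          · intro e he1 he2
            rw [List.getElem_set]
            simp only [pvCounts, List.getElem_map, List.getElem_range]
            have he256 : e < 256 := by simpa [pvCounts] using he2
            rw [pvCnt_append]
            by_cases heq : (pvB4 W).toNat = e
            · rw [if_pos heq,
                if_pos ⟨hl3, by rw [← hW, hWenc]; congr 1; omega⟩, heq]
            · rw [if_neg heq,
                if_neg (by
                  rintro ⟨-, habs⟩
                  rw [← hW, hWenc] at habs
                  have hba : pvB4 W = (e : Int) := by simpa using habs
                  omega)]
              simp
        rw [hcounts, hmod, hrunlen]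
      · rw [if_neg hrun]
        have hcounts : pvCounts (l ++ [c]) = pvCounts l := by
          unfold pvCounts
          apply List.map_congr_left
          intro e _
          rw [pvCnt_append]
          have hno : ¬ (3 ≤ l.length ∧ pvEnc (l.drop (l.length - 3) ++ [c]) = some (e : Int)) := by
            rintro ⟨hl3, habs⟩
            unfold pvEnc at habs
            by_cases hallok : (l.drop (l.length - 3) ++ [c]).all pvOk = true
            · have hpre : (l.drop (l.length - 3)).all pvOk = true := by
                simp only [List.all_append, Bool.and_eq_true] at hallok
                exact hallok.1
              have := pvVS_max l 3 (by omega) hpre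
              omega
            · rw [if_neg hallok] at habs
              simp at habs
          simp [hno]
        rw [hcounts, hmod, hrunlen]


-- ---------- A-side characterization ----------
lemma pvOfList4_inj {a b c d a' b' c' d' : Char}
    (h : String.ofList [a, b, c, d] = String.ofList [a', b', c', d']) :
    a = a' ∧ b = b' ∧ c = c' ∧ d = d' := by
  have := congrArg String.toList h
  simp at this
  exact ⟨this.1, this.2.1, this.2.2.1, this.2.2.2⟩

lemma pvTetras_nodup : pvTetras.Nodup := by
  have hL : ("ACGT".toList).Nodup := by decide
  have pair : ∀ (f : Char → List String),
      (∀ {x y : Char} {s : String}, s ∈ f x → s ∈ f y → x = y) →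
      ("ACGT".toList).Pairwise (Function.onFun List.Disjoint f) :=
    fun f h => hL.imp (fun hne s hs hs' => absurd (h hs hs') hne)
  unfold pvTetras
  rw [List.nodup_flatMap]
  constructor
  · intro a _
    rw [List.nodup_flatMap]
    constructor
    · intro b _
      rw [List.nodup_flatMap]
      constructor
      · intro c _
        exact hL.map (fun d d' h => (pvOfList4_inj h).2.2.2)
      · apply pair
        intro c c' s hs hs'
        simp only [List.mem_map] at hs hs'
        obtain ⟨d, _, hd⟩ := hs; obtain ⟨d', _, hd'⟩ := hs'
        exact (pvOfList4_inj (hd.trans hd'.symm)).2.2.1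
    · apply pair
      intro b b' s hs hs'
      simp only [List.mem_flatMap, List.mem_map] at hs hs'
      obtain ⟨c, _, d, _, hd⟩ := hs; obtain ⟨c', _, d', _, hd'⟩ := hs'
      exact (pvOfList4_inj (hd.trans hd'.symm)).2.1
  · apply pair
    intro a a' s hs hs'
    simp only [List.mem_flatMap, List.mem_map] at hs hs'
    obtain ⟨b, _, c, _, d, _, hd⟩ := hs; obtain ⟨b', _, c', _, d', _, hd'⟩ := hs'
    exact (pvOfList4_inj (hd.trans hd'.symm)).1

lemma pvLoop_keys (w : Int → String) :
    ∀ (is : List Int) (d : PySem.Dict String Int),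
      (is.foldl (fun d i => if d.contains (w i) then d.modify (w i) 0 (· + 1) else d) d).keys
        = d.keys := by
  intro is
  induction is with
  | nil => intro d; rfl
  | cons i is ih =>
    intro d
    simp only [List.foldl_cons]
    by_cases hc : d.contains (w i)
    · rw [if_pos hc, ih, PySem.Dict.keys_modify, PySem.Dict.keys_insert_of_contains _ _ hc]
    · rw [if_neg hc, ih]

lemma pvLoop_getD (w : Int → String) :
    ∀ (is : List Int) (d : PySem.Dict String Int) (k : String), d.contains k = true →
      (is.foldl (fun d i => if d.contains (w i) then d.modify (w i) 0 (· + 1) else d) d).getD k 0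
        = d.getD k 0 + ((is.map w).count k : Int) := by
  intro is
  induction is with
  | nil => intro d k _; simp
  | cons i is ih =>
    intro d k hk
    simp only [List.foldl_cons, List.map_cons]
    by_cases hc : d.contains (w i)
    · rw [if_pos hc]
      have hk' : (d.modify (w i) 0 (· + 1)).contains k = true := by
        rw [PySem.Dict.contains_modify]; simp [hk]
      rw [ih _ _ hk', PySem.Dict.getD_modify, List.count_cons]
      by_cases hkw : k = w i
      · subst hkw; simp; ring
      · have : ¬ (w i == k) := by simpa using fun h => hkw h.symm
        simp [hkw, this]
    · rw [if_neg hc]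
      have hkw : k ≠ w i := fun h => hc (h ▸ hk)
      have : ¬ (w i == k) := by simpa using fun h => hkw h.symm
      rw [ih _ _ hk, List.count_cons]
      simp [this]

lemma pvA_items (seq : String) :
    Counting_tetra seq = pvTetras.map (fun t =>
      (t, (((PySem.List.pyRange 0 (PySem.Str.len seq - 3) 1).map (pvWin seq)).count t : Int))) := by
  unfold Counting_tetra
  simp only []
  set is := PySem.List.pyRange 0 (PySem.Str.len seq - 3) 1 with his
  set d0 : PySem.Dict String Int :=
    pvTetras.foldl (fun d t => d.insert t 0) PySem.Dict.empty with hd0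
  have hitems0 : d0.items = pvTetras.map (fun t => (t, (0 : Int))) := by
    have := PySem.Dict.items_foldl_insert_fresh pvTetras id (fun _ => (0 : Int)) PySem.Dict.empty
      (fun a _ => PySem.Dict.contains_empty _) (by simpa using pvTetras_nodup)
    simpa using this
  have hkeys0 : d0.keys = pvTetras := by
    show d0.items.map Prod.fst = pvTetras
    rw [hitems0, List.map_map]; simp [Function.comp_def]
  set df := is.foldl
      (fun d i => let tetra := pvWin seq i;
        if d.contains tetra then d.modify tetra 0 (· + 1) else d) d0 with hdf
  have hdf' : df = is.foldl
      (fun d i => if d.contains (pvWin seq i) then d.modify (pvWin seq i) 0 (· + 1) else d) d0 := rfl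
  have hkeysf : df.keys = pvTetras := by rw [hdf', pvLoop_keys, hkeys0]
  have hnodupf : df.keys.Nodup := by rw [hkeysf]; exact pvTetras_nodup
  rw [PySem.Dict.items_eq_map_keys df hnodupf 0, hkeysf]
  apply List.map_congr_left
  intro t ht
  have hcont : d0.contains t = true := by
    rw [PySem.Dict.contains_iff_mem_keys, hkeys0]; exact ht
  have hgd0 : d0.getD t 0 = 0 := by
    apply PySem.Dict.getD_of_mem_items
    · rw [hitems0]; exact List.mem_map_of_mem ht
    · rw [hkeys0]; exact pvTetras_nodup
  rw [hdf', pvLoop_getD _ _ _ _ hcont, hgd0, zero_add]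

-- ---------- key decoding ----------
lemma pvDecode_toList (k : Nat) :
    (pvDecode (k : Int)).toList =
      ["ACGT".toList.getD (k / 64 % 4) 'A', "ACGT".toList.getD (k / 16 % 4) 'A',
       "ACGT".toList.getD (k / 4 % 4) 'A', "ACGT".toList.getD (k % 4) 'A'] := by
  have hdm : ∀ (m a b : Nat), PySem.Int.mod (PySem.Int.floordiv (m : Int) (a : Int)) (b : Int)
      = ((m / a % b : Nat) : Int) := by
    intro m a b
    rw [PySem.Int.floordiv_natCast, PySem.Int.mod_natCast]
  have hm : ∀ (m b : Nat), PySem.Int.mod (m : Int) (b : Int) = ((m % b : Nat) : Int) :=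
    fun m b => PySem.Int.mod_natCast m b
  have h64 : PySem.Int.mod (PySem.Int.floordiv (k : Int) 64) 4 = ((k / 64 % 4 : Nat) : Int) := by
    exact_mod_cast hdm k 64 4
  have h16 : PySem.Int.mod (PySem.Int.floordiv (k : Int) 16) 4 = ((k / 16 % 4 : Nat) : Int) := by
    exact_mod_cast hdm k 16 4
  have h4 : PySem.Int.mod (PySem.Int.floordiv (k : Int) 4) 4 = ((k / 4 % 4 : Nat) : Int) := by
    exact_mod_cast hdm k 4 4
  have h1 : PySem.Int.mod (k : Int) 4 = ((k % 4 : Nat) : Int) := by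
    exact_mod_cast hm k 4
  unfold pvDecode
  rw [String.toList_ofList, h64, h16, h4, h1,
    PySem.List.pyGetD_natCast, PySem.List.pyGetD_natCast, PySem.List.pyGetD_natCast,
    PySem.List.pyGetD_natCast]

set_option maxRecDepth 100000 in
lemma pvKD2aux : pvTetras.map String.toList = (List.range 256).map (fun k =>
    (["ACGT".toList.getD (k / 64 % 4) 'A', "ACGT".toList.getD (k / 16 % 4) 'A',
      "ACGT".toList.getD (k / 4 % 4) 'A', "ACGT".toList.getD (k % 4) 'A'] : List Char)) := by
  decide

lemma pvKD2 : pvTetras = (List.range 256).map (fun (k : Nat) => pvDecode (k : Int)) := by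
  have h2 : (List.range 256).map (fun (k : Nat) => (pvDecode (k : Int)).toList)
      = pvTetras.map String.toList := by
    rw [pvKD2aux]
    exact List.map_congr_left (fun k _ => pvDecode_toList k)
  have h3 := congrArg (List.map String.ofList) h2
  simpa [List.map_map, Function.comp_def, String.ofList_toList] using h3.symm

lemma pvBridge (c0 c1 c2 c3 : Char) (k : Nat) (hk : k < 256) :
    (PySem.Chars.upper [c0, c1, c2, c3] = (pvDecode (k : Int)).toList)
      ↔ pvEnc [c0, c1, c2, c3] = some (k : Int) := by
  rw [pvDecode_toList k]
  have hb0 := pvD0_bounds c0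
  have hb1 := pvD0_bounds c1
  have hb2 := pvD0_bounds c2
  have hb3 := pvD0_bounds c3
  have e0 := pvCharBridge c0 (k / 64 % 4) (by omega)
  have e1 := pvCharBridge c1 (k / 16 % 4) (by omega)
  have e2 := pvCharBridge c2 (k / 4 % 4) (by omega)
  have e3 := pvCharBridge c3 (k % 4) (by omega)
  have hB4 : pvB4 [c0, c1, c2, c3]
      = ((pvD0 c0 * 4 + pvD0 c1) * 4 + pvD0 c2) * 4 + pvD0 c3 := by
    simp [pvB4]
  constructor
  · intro h
    simp only [PySem.Chars.upper, List.map_cons, List.map_nil, List.cons.injEq, and_true] at h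
    obtain ⟨h0, h1, h2, h3⟩ := h
    have g0 := (pvGet_iff_ok _ _).mp (e0.mp h0)
    have g1 := (pvGet_iff_ok _ _).mp (e1.mp h1)
    have g2 := (pvGet_iff_ok _ _).mp (e2.mp h2)
    have g3 := (pvGet_iff_ok _ _).mp (e3.mp h3)
    unfold pvEnc
    rw [if_pos (by simp [g0.1, g1.1, g2.1, g3.1])]
    congr 1
    rw [hB4, g0.2, g1.2, g2.2, g3.2]
    omega
  · intro h
    unfold pvEnc at h
    by_cases hall : ([c0, c1, c2, c3].all pvOk) = true
    · rw [if_pos hall] at h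
      simp only [List.all_cons, List.all_nil, Bool.and_true, Bool.and_eq_true] at hall
      obtain ⟨ok0, ok1, ok2, ok3⟩ := hall
      have hval : ((pvD0 c0 * 4 + pvD0 c1) * 4 + pvD0 c2) * 4 + pvD0 c3 = (k : Int) := by
        rw [← hB4]; simpa using h
      have d0eq : pvD0 c0 = ((k / 64 % 4 : Nat) : Int) := by omega
      have d1eq : pvD0 c1 = ((k / 16 % 4 : Nat) : Int) := by omega
      have d2eq : pvD0 c2 = ((k / 4 % 4 : Nat) : Int) := by omega
      have d3eq : pvD0 c3 = ((k % 4 : Nat) : Int) := by omega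
      simp only [PySem.Chars.upper, List.map_cons, List.map_nil, List.cons.injEq, and_true]
      exact ⟨e0.mpr ((pvGet_iff_ok _ _).mpr ⟨ok0, d0eq⟩),
        e1.mpr ((pvGet_iff_ok _ _).mpr ⟨ok1, d1eq⟩),
        e2.mpr ((pvGet_iff_ok _ _).mpr ⟨ok2, d2eq⟩),
        e3.mpr ((pvGet_iff_ok _ _).mpr ⟨ok3, d3eq⟩)⟩
    · rw [if_neg hall] at h
      simp at h

-- ---------- the window strings ----------
lemma pvWin_eq (seq : String) (j : Nat) :
    pvWin seq (j : Int) = String.ofList (PySem.Chars.upper ((seq.toList.drop j).take 4)) := by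
  unfold pvWin
  simp only [PySem.Str.upper, PySem.Str.slice, PySem.Chars.slice, String.toList_ofList]
  congr 2
  rw [show ((j : Int) + 4) = (((j + 4 : Nat)) : Int) from by push_cast; ring,
    PySem.List.slice_natCast]
  congr 1
  omega

lemma pvCountA (seq : String) (k : Nat) (hk : k < 256) :
    (((PySem.List.pyRange 0 (PySem.Str.len seq - 3) 1).map (pvWin seq)).count
        (pvDecode (k : Int)) : Int)
      = pvCnt seq.toList k := by
  rw [PySem.List.pyRange_zero,
    show (PySem.Str.len seq - 3).toNat = seq.toList.length - 3 from by
      rw [PySem.Str.len_eq]; omega]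
  unfold pvCnt
  congr 1
  rw [List.count_eq_countP, List.countP_map, List.countP_map]
  apply List.countP_congr
  intro j hj
  rw [List.mem_range] at hj
  have hj4 : j + 4 ≤ seq.toList.length := by omega
  have hwlen : ((seq.toList.drop j).take 4).length = 4 := by
    simp only [List.length_take, List.length_drop]
    omega
  obtain ⟨c0, c1, c2, c3, hw⟩ :
      ∃ c0 c1 c2 c3, (seq.toList.drop j).take 4 = [c0, c1, c2, c3] := by
    match hx : (seq.toList.drop j).take 4, hwlen with
    | [c0, c1, c2, c3], _ => exact ⟨c0, c1, c2, c3, rfl⟩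
  simp only [Function.comp]
  rw [pvWin_eq seq j, hw]
  have hiff := pvBridge c0 c1 c2 c3 k hk
  simp only [beq_iff_eq]
  constructor
  · intro h
    exact hiff.mp (by rw [← String.toList_ofList (l := PySem.Chars.upper [c0, c1, c2, c3]), h])
  · intro h
    rw [show String.ofList (PySem.Chars.upper [c0, c1, c2, c3])
        = String.ofList ((pvDecode (k : Int)).toList) from by rw [hiff.mpr h]]
    exact String.ofList_toList

-- ---------- B-side characterization ----------
lemma pvRange256 : PySem.List.pyRange 0 256 1 = (List.range 256).map (fun k => ((k : Nat) : Int)) := by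
  rw [show (256 : Int) = ((256 : Nat) : Int) from by norm_num]
  exact PySem.List.pyRange_zero_nat 256

lemma pvB_items (seq : String) :
    Counting_tetra_alt seq = (List.range 256).map (fun (k : Nat) =>
      (pvDecode (k : Int), PySem.List.pyGetD
        (seq.toList.foldl pvStepB (PySem.List.pyRepeat [(0 : Int)] 256, 0, 0)).1 (k : Int) 0)) := by
  unfold Counting_tetra_alt
  simp only []
  rw [PySem.Dict.items_foldl_insert_fresh (PySem.List.pyRange 0 256 1) pvDecode _
      PySem.Dict.empty (fun a _ => PySem.Dict.contains_empty _)
      (by rw [pvRange256, List.map_map]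
          exact pvKD2 ▸ pvTetras_nodup)]
  rw [show PySem.Dict.empty.items = ([] : List (String × Int)) from rfl, List.nil_append,
    pvRange256, List.map_map]
  rfl

-- ===== VERDICT (by name: the statement is the Claim_ definition above) =====
set_option maxRecDepth 100000 in
theorem Counting_tetra_spec : Claim_equal_Counting_tetra := by
  intro seq _
  unfold Spec_Counting_tetra
  have hA : Counting_tetra seq = (List.range 256).map (fun (k : Nat) =>
      (pvDecode (k : Int),
        (((PySem.List.pyRange 0 (PySem.Str.len seq - 3) 1).map (pvWin seq)).count
          (pvDecode (k : Int)) : Int))) := by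
    rw [pvA_items, pvKD2, List.map_map]
    exact List.map_congr_left (fun k _ => rfl)
  rw [hA, pvB_items]
  apply List.map_congr_left
  intro k hk
  rw [List.mem_range] at hk
  refine Prod.ext rfl ?_
  show (((PySem.List.pyRange 0 (PySem.Str.len seq - 3) 1).map (pvWin seq)).count
      (pvDecode (k : Int)) : Int) = _
  rw [pvCountA seq k hk]
  have hfst : (seq.toList.foldl pvStepB (PySem.List.pyRepeat [(0 : Int)] 256, 0, 0)).1
      = pvCounts seq.toList := by rw [pvInv]
  rw [hfst]
  unfold pvCounts
  rw [PySem.List.pyGetD_natCast]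
  exact (PySem.List.getD_map_range (pvCnt seq.toList) 256 k 0 hk).symm
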